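-- pv_equiv track=rewrite | github.com/mikechen66/Data_Structures_Algorithms_in_Python | chapter05/solutions.py | find_5_set
-- ===== SOURCE A (Python) =====
-- def find_5_set(S):
--     prev_nums = set()
--     repeats = []
--     for element in S:
--         if element in prev_nums:
--             repeats.append(element)
--         else:
--             prev_nums.add(element)
--     return repeats
-- ===== SOURCE B (Python) =====
-- def find_5_set(S):
--     lst = list(S)
--     first = {}
--     for i, x in enumerate(lst):
--         if x not in first:
--             first[x] = i
--     return [x for i, x in enumerate(lst) if first[x] != i]
-- ===== Notes on version B (the rewrite author's own statement) =====
-- stated objective: alternative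
-- what changed: B replaces A's running membership-set with a precomputed value-to-first-occurrence-index table and then filters by position (emit an element iff its index differs from its recorded first index), splitting A's single guarded accumulation into build-table-then-filter passes.
import Mathlib
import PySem

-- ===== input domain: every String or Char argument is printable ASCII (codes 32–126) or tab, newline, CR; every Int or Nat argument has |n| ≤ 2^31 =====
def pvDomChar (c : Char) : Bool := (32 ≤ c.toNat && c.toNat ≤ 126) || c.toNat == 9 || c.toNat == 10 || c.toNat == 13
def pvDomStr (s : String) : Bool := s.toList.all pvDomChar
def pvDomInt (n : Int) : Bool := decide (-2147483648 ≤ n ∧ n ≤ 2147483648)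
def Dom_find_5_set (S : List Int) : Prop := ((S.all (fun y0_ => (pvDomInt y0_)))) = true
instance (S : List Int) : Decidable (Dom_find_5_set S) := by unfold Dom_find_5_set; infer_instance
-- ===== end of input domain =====

-- B replaces A's running membership-set by a first-occurrence-index table plus a
-- positional filter (alternative decomposition, same asymptotic cost).

-- ===== PORT A =====
-- A: one pass keeping (prev_nums : set, repeats : list); append e when already seen.
def find_5_set (S : List Int) : List Int :=
  (S.foldl
    (fun (st : PySem.Set Int × List Int) e =>
      if PySem.Set.contains st.1 e then (st.1, st.2 ++ [e])
      else (PySem.Set.add st.1 e, st.2))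
    ((PySem.Set.empty : PySem.Set Int), ([] : List Int))).2

-- ===== PORT B =====
-- B helper: the dict mapping each value to the index of its first occurrence
-- ('for i, x in enumerate(lst): if x not in first: first[x] = i').
def pvFirst (S : List Int) : PySem.Dict Int Int :=
  (PySem.List.enumerate S 0).foldl
    (fun d p => if d.contains p.2 then d else d.insert p.2 p.1)
    PySem.Dict.empty

-- B: '[x for i, x in enumerate(lst) if first[x] != i]'
def find_5_set_alt (S : List Int) : List Int :=
  ((PySem.List.enumerate S 0).filter
      (fun p => decide (PySem.Dict.getD (pvFirst S) p.2 0 ≠ p.1))).map (·.2)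

-- ===== PRECONDITION & SPEC =====
def Spec_find_5_set (S : List Int) (out : List Int) : Prop := out = find_5_set_alt S
instance (S : List Int) (out : List Int) : Decidable (Spec_find_5_set S out) := by unfold Spec_find_5_set; infer_instance

-- ===== CLAIM (what is proved, stated in full; the proofs are below) =====
def Claim_equal_find_5_set : Prop := ∀ (S : List Int), Dom_find_5_set S → Spec_find_5_set S (find_5_set S)

-- ===== LEMMAS AND PROOFS =====

-- The set component of A's fold is 'update s S' no matter what the list component does.
theorem pv_A_fold_fst (S : List Int) : ∀ (s : PySem.Set Int) (r : List Int),
    (S.foldl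
      (fun (st : PySem.Set Int × List Int) e =>
        if PySem.Set.contains st.1 e then (st.1, st.2 ++ [e])
        else (PySem.Set.add st.1 e, st.2)) (s, r)).1 = PySem.Set.update s S := by
  induction S with
  | nil => intro s r; simp [PySem.Set.update_nil]
  | cons x xs ih =>
    intro s r
    rw [PySem.Set.update_cons]
    simp only [List.foldl_cons]
    by_cases hx : PySem.Set.contains s x = true
    · rw [if_pos hx, PySem.Set.add_of_mem ((PySem.Set.contains_iff s x).mp hx)]
      exact ih s (r ++ [x])
    · rw [if_neg hx]; exact ih _ r

-- A's recurrence from the right: appending y appends y to the result iff y already occurs.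
theorem pv_A_snoc (T : List Int) (y : Int) :
    find_5_set (T ++ [y]) = find_5_set T ++ (if y ∈ T then [y] else []) := by
  unfold find_5_set
  rw [List.foldl_append]
  simp only [List.foldl_cons, List.foldl_nil]
  rw [show ((T.foldl
      (fun (st : PySem.Set Int × List Int) e =>
        if PySem.Set.contains st.1 e then (st.1, st.2 ++ [e])
        else (PySem.Set.add st.1 e, st.2))
      ((PySem.Set.empty : PySem.Set Int), ([] : List Int))).1)
      = PySem.Set.update PySem.Set.empty T from pv_A_fold_fst T _ _]
  rw [PySem.Set.update_empty]
  have hcont : PySem.Set.contains (PySem.Set.ofList T) y = decide (y ∈ T) := by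
    by_cases h : y ∈ T
    · simp only [h, decide_true]
      exact (PySem.Set.contains_iff _ _).mpr ((PySem.Set.mem_ofList T y).mpr h)
    · simp only [h, decide_false]
      cases hc : PySem.Set.contains (PySem.Set.ofList T) y
      · rfl
      · exact absurd ((PySem.Set.mem_ofList T y).mp ((PySem.Set.contains_iff _ _).mp hc)) h
  rw [hcont]
  by_cases hy : y ∈ T
  · rw [if_pos (by simp [hy]), if_pos hy]
  · rw [if_neg (by simp [hy]), if_neg hy]
    simp

-- The first-occurrence table looks up the index of the first occurrence.
theorem pv_first_get? (S : List Int) : ∀ (x : Int),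
    (pvFirst S).get? x = if x ∈ S then some ((S.idxOf x : Nat) : Int) else none := by
  induction S using List.reverseRecOn with
  | nil => intro x; simp [pvFirst, PySem.List.enumerate_nil, PySem.Dict.get?_empty]
  | append_singleton T y ih =>
    intro x
    have hstep : pvFirst (T ++ [y]) =
        if (pvFirst T).contains y then pvFirst T
        else (pvFirst T).insert y (T.length : Int) := by
      unfold pvFirst
      rw [PySem.List.enumerate_append, List.foldl_append]
      simp [PySem.List.enumerate_cons, PySem.List.enumerate_nil]
    have hcont : (pvFirst T).contains y = decide (y ∈ T) := by
      rw [PySem.Dict.contains_eq_isSome_get?, ih y]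
      by_cases hy : y ∈ T <;> simp [hy]
    rw [hstep, hcont]
    by_cases hy : y ∈ T
    · rw [if_pos (by simp [hy]), ih x]
      by_cases hx : x ∈ T
      · rw [if_pos hx, if_pos (List.mem_append_left _ hx),
          List.idxOf_append_of_mem hx]
      · rw [if_neg hx, if_neg (by
          intro hmem
          rcases List.mem_append.mp hmem with h | h
          · exact hx h
          · have hxy : x = y := by simpa using h
            exact hx (hxy ▸ hy))]
    · rw [if_neg (by simp [hy]), PySem.Dict.get?_insert]
      by_cases hxy : x = y
      · subst hxy
        rw [if_pos rfl, if_pos (List.mem_append_right _ (by simp)),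
          List.idxOf_append_of_notMem hy]
        simp
      · rw [if_neg hxy, ih x]
        by_cases hx : x ∈ T
        · rw [if_pos hx, if_pos (List.mem_append_left _ hx),
            List.idxOf_append_of_mem hx]
        · rw [if_neg hx, if_neg (by
            intro hmem
            rcases List.mem_append.mp hmem with h | h
            · exact hx h
            · exact hxy (by simpa using h))]

-- getD form of the table lookup for members.
theorem pv_first_getD (S : List Int) (x : Int) (hx : x ∈ S) :
    (pvFirst S).getD x 0 = ((S.idxOf x : Nat) : Int) := by
  rw [PySem.Dict.getD_eq_get?_getD, pv_first_get? S x, if_pos hx]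
  rfl

-- B's recurrence from the right.
theorem pv_B_snoc (T : List Int) (y : Int) :
    find_5_set_alt (T ++ [y]) = find_5_set_alt T ++ (if y ∈ T then [y] else []) := by
  unfold find_5_set_alt
  rw [PySem.List.enumerate_append, List.filter_append, List.map_append]
  congr 1
  · -- prefix part: the table built over T ++ [y] agrees with the one over T on elements of T
    congr 1
    apply List.filter_congr
    intro p hp
    rcases (PySem.List.mem_enumerate_iff T 0 p).mp hp with ⟨k, hk, rfl⟩
    simp only
    rw [pv_first_getD (T ++ [y]) _ (List.mem_append_left _ (List.getElem_mem hk)),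
      pv_first_getD T _ (List.getElem_mem hk),
      List.idxOf_append_of_mem (List.getElem_mem hk)]
  · -- the new last pair (len T, y)
    simp only [PySem.List.enumerate_cons, PySem.List.enumerate_nil]
    rw [show pvFirst (T ++ [y]) = pvFirst (T ++ [y]) from rfl]
    by_cases hy : y ∈ T
    · have : (pvFirst (T ++ [y])).getD y 0 = ((T.idxOf y : Nat) : Int) := by
        rw [pv_first_getD (T ++ [y]) y (List.mem_append_left _ hy),
          List.idxOf_append_of_mem hy]
      have hlt : T.idxOf y < T.length := List.idxOf_lt_length_of_mem hy
      rw [if_pos hy]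
      simp only [List.filter_cons, List.filter_nil]
      rw [this, if_pos (by simp; omega)]
      simp
    · have : (pvFirst (T ++ [y])).getD y 0 = ((T.length : Nat) : Int) := by
        rw [pv_first_getD (T ++ [y]) y (List.mem_append_right _ (by simp)),
          List.idxOf_append_of_notMem hy]
        simp
      rw [if_neg hy]
      simp only [List.filter_cons, List.filter_nil]
      rw [this, if_neg (by simp)]
      simp

theorem pv_A_eq_B (S : List Int) : find_5_set S = find_5_set_alt S := by
  induction S using List.reverseRecOn with
  | nil => rfl
  | append_singleton T y ih => rw [pv_A_snoc, pv_B_snoc, ih]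

-- ===== VERDICT (by name: the statement is the Claim_ definition above) =====
theorem find_5_set_spec : Claim_equal_find_5_set := by
  intro S _
  unfold Spec_find_5_set
  exact pv_A_eq_B S
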